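-- pv_equiv track=rewrite | github.com/SimoneBreg96/pyProject1 | test.py | newFunction
-- ===== SOURCE A (Python) =====
-- def newFunction(n):
--     if(n<=2):
--         return [1,2]
--     t_prev = 1
--     t = 2
--     while(t<n):
--         temp = t
--         t = t+t_prev
--         t_prev = temp
--     return [t_prev,t]
-- ===== SOURCE B (Python) =====
-- def newFunction(n):
--     # Build the whole Fibonacci-like list once, then scan adjacent pairs
--     # for the first upper element >= n (always found: the last element is >= n).
--     fibs = [1, 2]
--     while fibs[-1] < n:
--         fibs.append(fibs[-1] + fibs[-2])
--     for lo, hi in zip(fibs, fibs[1:]):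
--         if hi >= n:
--             return [lo, hi]
-- ===== Notes on version B (the rewrite author's own statement) =====
-- stated objective: alternative
-- what changed: B replaces A's two-variable while loop with two passes: it first materialises the whole Fibonacci list [1,2,3,...] until the last element reaches n, then scans adjacent pairs for the first upper element >= n; A's strict t<n test and the n<=2 case fall out of the scan with no special-casing.
import Mathlib
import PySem

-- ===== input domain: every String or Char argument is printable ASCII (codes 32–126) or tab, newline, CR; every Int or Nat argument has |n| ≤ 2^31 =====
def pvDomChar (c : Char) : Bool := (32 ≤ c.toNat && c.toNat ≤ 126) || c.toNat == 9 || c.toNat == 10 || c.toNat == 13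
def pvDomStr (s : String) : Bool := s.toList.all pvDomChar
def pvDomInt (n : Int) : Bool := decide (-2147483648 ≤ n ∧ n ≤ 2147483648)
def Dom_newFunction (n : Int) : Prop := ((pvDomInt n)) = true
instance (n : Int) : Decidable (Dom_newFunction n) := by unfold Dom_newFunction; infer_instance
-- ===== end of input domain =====

-- B builds the whole Fibonacci list once and then scans adjacent pairs for the first
-- upper element >= n, instead of A's two-variable while loop (objective: alternative).

-- ===== PORT A =====
-- A's while loop: the proof argument (0 < t_prev ∧ t_prev ≤ t) only justifies termination.
def pvLoopA (n t_prev t : Int) (h : 0 < t_prev ∧ t_prev ≤ t) : List Int :=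
  if t < n then pvLoopA n t (t + t_prev) ⟨by omega, by omega⟩ else [t_prev, t]
termination_by (n - t).toNat
decreasing_by omega

def newFunction (n : Int) : List Int :=
  if n ≤ 2 then [1, 2]
  else pvLoopA n 1 2 ⟨by norm_num, by norm_num⟩

-- ===== PORT B =====
-- while fibs[-1] < n: fibs.append(fibs[-1]+fibs[-2]); a,b track the last two elements
-- (the proof argument only justifies termination).
def pvBuild (n : Int) (fibs : List Int) (a b : Int) (h : 0 < a ∧ a < b) : List Int :=
  if b < n then pvBuild n (fibs ++ [b + a]) b (b + a) ⟨by omega, by omega⟩ else fibs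
termination_by (n - b).toNat
decreasing_by omega

-- for lo, hi in zip(fibs, fibs[1:]): if hi >= n: return [lo, hi]
-- the none branch is unreachable for the lists B builds (Python would fall off the loop).
def pvScan (n : Int) (fibs : List Int) : List Int :=
  match (fibs.zip (fibs.drop 1)).find? (fun p => decide (n ≤ p.2)) with
  | some (lo, hi) => [lo, hi]
  | none => []

def newFunction_alt (n : Int) : List Int :=
  pvScan n (pvBuild n [1, 2] 1 2 ⟨by norm_num, by norm_num⟩)

-- ===== PRECONDITION & SPEC =====
def Spec_newFunction (n : Int) (out : List Int) : Prop := out = newFunction_alt n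
instance (n : Int) (out : List Int) : Decidable (Spec_newFunction n out) := by unfold Spec_newFunction; infer_instance

-- ===== CLAIM (what is proved, stated in full; the proofs are below) =====
def Claim_equal_newFunction : Prop := ∀ (n : Int), Dom_newFunction n → Spec_newFunction n (newFunction n)

-- ===== LEMMAS AND PROOFS =====

-- the first pair whose upper element is ≥ n is the last one, when everything before is < n
theorem pv_find_last (n : Int) : ∀ (c : List Int) (a b : Int),
    (∀ x ∈ c, x < n) → (c = [] ∨ a < n) → n ≤ b →
    ((c ++ [a, b]).zip ((c ++ [a, b]).drop 1)).find? (fun p => decide (n ≤ p.2))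
      = some (a, b) := by
  intro c
  induction c with
  | nil => intro a b _ _ hb; simp [hb]
  | cons x c ih =>
    intro a b hc ha hb
    have han : a < n := ha.resolve_left (by simp)
    have hcons : ∃ y ys, c ++ [a, b] = y :: ys ∧ y < n := by
      cases c with
      | nil => exact ⟨a, [b], by simp, han⟩
      | cons z zs => exact ⟨z, zs ++ [a, b], by simp, hc z (by simp)⟩
    obtain ⟨y, ys, hy, hyn⟩ := hcons
    have hx : (x :: c ++ [a, b]) = x :: y :: ys := by simp [hy]
    rw [hx]
    have hfirst : ¬ (n ≤ y) := by omega
    have hrec := ih a b (fun z hz => hc z (by simp [hz])) (Or.inr han) hb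
    rw [hy] at hrec
    simpa [List.find?, hfirst] using hrec

theorem pv_key : ∀ (k : Nat) (n a b : Int) (h : 0 < a ∧ a < b) (c : List Int),
    (n - b).toNat ≤ k → (∀ x ∈ c, x < n) → (c = [] ∨ a < n) →
    pvScan n (pvBuild n (c ++ [a, b]) a b h) = pvLoopA n a b ⟨h.1, le_of_lt h.2⟩ := by
  intro k
  induction k with
  | zero =>
    intro n a b h c hk hc ha
    have hnb : ¬ b < n := by omega
    rw [pvBuild, if_neg hnb, pvLoopA, if_neg hnb]
    unfold pvScan
    rw [pv_find_last n c a b hc ha (by omega)]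
  | succ k ih =>
    intro n a b h c hk hc ha
    by_cases hnb : b < n
    · rw [pvBuild, if_pos hnb, pvLoopA, if_pos hnb]
      have heq : (c ++ [a, b]) ++ [b + a] = (c ++ [a]) ++ [b, b + a] := by simp
      rw [heq]
      have := ih n b (b + a) ⟨by omega, by omega⟩ (c ++ [a])
        (by omega)
        (by intro x hx; rcases List.mem_append.mp hx with hx | hx
            · exact hc x hx
            · simp at hx; omega)
        (Or.inr hnb)
      exact this
    · rw [pvBuild, if_neg hnb, pvLoopA, if_neg hnb]
      unfold pvScan
      rw [pv_find_last n c a b hc ha (by omega)]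

-- ===== VERDICT (by name: the statement is the Claim_ definition above) =====
theorem newFunction_spec : Claim_equal_newFunction := by
  intro n _
  unfold Spec_newFunction newFunction newFunction_alt
  by_cases h2 : n ≤ 2
  · have hn2 : ¬ (2 < n) := by omega
    rw [if_pos h2, pvBuild, if_neg hn2]
    simp [pvScan, h2]
  · rw [if_neg h2]
    have := pv_key ((n - 2).toNat) n 1 2 ⟨by norm_num, by norm_num⟩ [] le_rfl
      (by simp) (Or.inl rfl)
    simpa using this.symm
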